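-- pv_equiv track=rewrite | github.com/rustedshader/cp | codeforces/completed/2092/B/main.py | solve
-- ===== SOURCE A (Python) =====
-- def solve(a, b, n):
--     arr1 = []
--     arr2 = []
--     a1 = 0
--     a2 = 0
--     for i in range(n):
--         if i % 2 == 0:
--             arr1.append(b[i])
--             arr2.append(a[i])
--             a2 += 1
--         else:
--             arr1.append(a[i])
--             arr2.append(b[i])
--             a1 += 1
--     if arr1.count("0") >= a1 and arr2.count("0") >= a2:
--         return True
--     else:
--         return False
-- ===== SOURCE B (Python) =====
-- def solve(a, b, n):
--     # arr1 holds b at even indices and a at odd indices; arr2 the opposite.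
--     # Count the zeros directly with slices; thresholds: a1 = n//2 odd slots, a2 = (n+1)//2 even slots.
--     z1 = b[0:n:2].count("0") + a[1:n:2].count("0")
--     z2 = a[0:n:2].count("0") + b[1:n:2].count("0")
--     return z1 >= n // 2 and z2 >= (n + 1) // 2
-- ===== Notes on version B (the rewrite author's own statement) =====
-- stated objective: simpler
-- what changed: B removes A's index loop and the two intermediate arrays entirely: it counts '0's in the four parity slices b[0:n:2], a[1:n:2], a[0:n:2], b[1:n:2] and compares against the closed-form thresholds n//2 and (n+1)//2.
import Mathlib
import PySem

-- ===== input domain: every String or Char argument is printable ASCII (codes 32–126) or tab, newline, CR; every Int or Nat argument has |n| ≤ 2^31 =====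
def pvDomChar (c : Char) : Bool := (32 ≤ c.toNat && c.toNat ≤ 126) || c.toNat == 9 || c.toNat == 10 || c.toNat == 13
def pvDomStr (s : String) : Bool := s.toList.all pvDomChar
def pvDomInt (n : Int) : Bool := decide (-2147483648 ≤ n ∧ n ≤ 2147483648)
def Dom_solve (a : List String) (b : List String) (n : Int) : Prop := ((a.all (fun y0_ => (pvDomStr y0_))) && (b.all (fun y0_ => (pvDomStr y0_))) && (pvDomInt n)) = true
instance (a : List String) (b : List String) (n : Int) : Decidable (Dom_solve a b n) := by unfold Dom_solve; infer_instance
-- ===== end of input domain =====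

-- B drops A's loop and the intermediate arrays: it counts zeros in four parity slices and
-- compares them with the closed-form thresholds n//2 and (n+1)//2 (objective: simpler).

-- ===== PORT A =====
def solve (a : List String) (b : List String) (n : Int) : Bool :=
  let st := (PySem.List.pyRange 0 n 1).foldl
    (fun (s : List String × List String × Int × Int) i =>
      if PySem.Int.mod i 2 = 0 then
        (s.1 ++ [PySem.List.pyGetD b i ""], s.2.1 ++ [PySem.List.pyGetD a i ""],
         s.2.2.1, s.2.2.2 + 1)
      else
        (s.1 ++ [PySem.List.pyGetD a i ""], s.2.1 ++ [PySem.List.pyGetD b i ""],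
         s.2.2.1 + 1, s.2.2.2))
    ([], [], 0, 0)
  decide ((List.count "0" st.1 : Int) ≥ st.2.2.1 ∧ (List.count "0" st.2.1 : Int) ≥ st.2.2.2)

-- ===== PORT B =====
def solve_alt (a : List String) (b : List String) (n : Int) : Bool :=
  let z1 := List.count "0" ((PySem.List.slice? b (some 0) (some n) 2).getD [])
          + List.count "0" ((PySem.List.slice? a (some 1) (some n) 2).getD [])
  let z2 := List.count "0" ((PySem.List.slice? a (some 0) (some n) 2).getD [])
          + List.count "0" ((PySem.List.slice? b (some 1) (some n) 2).getD [])
  decide ((z1 : Int) ≥ PySem.Int.floordiv n 2 ∧ (z2 : Int) ≥ PySem.Int.floordiv (n + 1) 2)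

-- ===== PRECONDITION & SPEC =====
-- Pre_ excludes exactly the inputs where A raises IndexError: n larger than a list length.
def Pre_solve (a : List String) (b : List String) (n : Int) : Prop :=
  n ≤ (a.length : Int) ∧ n ≤ (b.length : Int)
instance (a : List String) (b : List String) (n : Int) : Decidable (Pre_solve a b n) := by
  unfold Pre_solve; infer_instance

def pvWitness_solve : List String × List String × Int := (["0", "1"], ["1", "0"], 2)

def Spec_solve (a : List String) (b : List String) (n : Int) (out : Bool) : Prop := out = solve_alt a b n
instance (a : List String) (b : List String) (n : Int) (out : Bool) : Decidable (Spec_solve a b n out) := by unfold Spec_solve; infer_instance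

-- ===== CLAIM (what is proved, stated in full; the proofs are below) =====
def Claim_equal_solve : Prop := ∀ (a : List String) (b : List String) (n : Int), Dom_solve a b n → Pre_solve a b n → Spec_solve a b n (solve a b n)

-- ===== LEMMAS AND PROOFS =====

-- zeros of xs at indices < m whose parity is p
def zP (xs : List String) (p : Nat) : Nat → Nat
  | 0 => 0
  | m + 1 => zP xs p m + (if m % 2 = p ∧ xs.getD m "" = "0" then 1 else 0)

theorem count0_singleton (x : String) : List.count "0" [x] = if x = "0" then 1 else 0 := by
  by_cases h : x = "0" <;> simp [h]

theorem step_count (n1 n2 : Nat) (x : String) (P Q : Prop) [Decidable P] [Decidable Q]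
    (hP : P ↔ x = "0") (hQ : ¬ Q) :
    n1 + n2 + List.count "0" [x]
      = (n1 + if P then 1 else 0) + (n2 + if Q then 1 else 0) := by
  rw [count0_singleton, if_neg hQ]
  by_cases h : x = "0"
  · rw [if_pos h, if_pos (hP.mpr h)]; omega
  · rw [if_neg h, if_neg (fun hp => h (hP.mp hp))]; omega

theorem step_count' (n1 n2 : Nat) (x : String) (P Q : Prop) [Decidable P] [Decidable Q]
    (hP : ¬ P) (hQ : Q ↔ x = "0") :
    n1 + n2 + List.count "0" [x]
      = (n1 + if P then 1 else 0) + (n2 + if Q then 1 else 0) := by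
  rw [count0_singleton, if_neg hP]
  by_cases h : x = "0"
  · rw [if_pos h, if_pos (hQ.mpr h)]; omega
  · rw [if_neg h, if_neg (fun hq => h (hQ.mp hq))]; omega

-- B-side: a step-2 slice with natural bounds p ≤ 1 and m ≤ |xs| lists xs at indices p, p+2, … < m
theorem slice2_eq (xs : List String) (p m : Nat) (hp : p ≤ 1) (hm : m ≤ xs.length) :
    (PySem.List.slice? xs (some (p : Int)) (some (m : Int)) 2).getD [] =
      (List.range ((m + 1 - p) / 2)).map (fun k => xs.getD (p + 2 * k) "") := by
  have h1 : ¬((p : Int) < 0) := by omega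
  have h2 : ¬((m : Int) < 0) := by omega
  simp only [PySem.List.slice?, PySem.List.sliceIndices, h1, h2, if_false,
    show ¬((2 : Int) = 0) by omega, show ¬((2 : Int) < 0) by omega, show (0:Int) < 2 by omega,
    if_true, if_false, Option.getD_some]
  have h3 : min (m : Int) (xs.length : Int) = (m : Int) := by omega
  rw [h3]
  by_cases hpm : p < m
  · have hsp : min (p : Int) (xs.length : Int) = (p : Int) := by omega
    rw [hsp, if_pos (by omega : (p : Int) < (m : Int))]
    have hcnt : (((m : Int) - p + 2 - 1) / 2).toNat = (m + 1 - p) / 2 := by omega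
    rw [hcnt]
    have hptw : ∀ k ∈ List.range ((m + 1 - p) / 2),
        xs[(((p : Int)) + 2 * (k : Int)).toNat]? = some (xs.getD (p + 2 * k) "") := by
      intro k hk
      rw [List.mem_range] at hk
      have hidx : ((p : Int) + 2 * (k : Int)).toNat = p + 2 * k := by omega
      rw [hidx]
      have hlt : p + 2 * k < xs.length := by omega
      simp [List.getD, List.getElem?_eq_getElem hlt]
    rw [List.filterMap_congr hptw]
    exact List.filterMap_eq_map (f := fun k => xs.getD (p + 2 * k) "") ▸ rfl
  · rw [if_neg (by omega : ¬ (min (p : Int) (xs.length : Int) < (m : Int)))]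
    rw [show (m + 1 - p) / 2 = 0 by omega]
    simp

theorem count_range_zP (xs : List String) (p : Nat) (hp : p ≤ 1) (m : Nat) :
    List.count "0" ((List.range ((m + 1 - p) / 2)).map (fun k => xs.getD (p + 2 * k) "")) = zP xs p m := by
  induction m with
  | zero => rw [show (0 + 1 - p) / 2 = 0 by omega]; simp [zP]
  | succ m ih =>
    by_cases hpar : m % 2 = p
    · have hstep : (m + 1 + 1 - p) / 2 = (m + 1 - p) / 2 + 1 := by omega
      have hidx : p + 2 * ((m + 1 - p) / 2) = m := by omega
      rw [hstep, List.range_succ, List.map_append, List.count_append, ih]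
      simp only [List.map_cons, List.map_nil, hidx]
      simp only [zP, hpar, true_and]
      by_cases h0 : xs[m]?.getD "" = "0" <;> simp [h0]
    · have hstep : (m + 1 + 1 - p) / 2 = (m + 1 - p) / 2 := by omega
      rw [hstep, ih]
      simp [zP, hpar]

-- A-side: after the loop over range(n) the two arrays hold n//2 resp. (n+1)//2 entries and
-- their zero-counts are the parity-split zero-counts of a and b
theorem foldA (a b : List String) (m : Nat) (ha : m ≤ a.length) (hb : m ≤ b.length) :
    ∃ u v : List String,
      (PySem.List.pyRange 0 (m : Int) 1).foldl
        (fun (s : List String × List String × Int × Int) i =>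
          if PySem.Int.mod i 2 = 0 then
            (s.1 ++ [PySem.List.pyGetD b i ""], s.2.1 ++ [PySem.List.pyGetD a i ""],
             s.2.2.1, s.2.2.2 + 1)
          else
            (s.1 ++ [PySem.List.pyGetD a i ""], s.2.1 ++ [PySem.List.pyGetD b i ""],
             s.2.2.1 + 1, s.2.2.2))
        ([], [], 0, 0)
      = (u, v, ((m / 2 : Nat) : Int), (((m + 1) / 2 : Nat) : Int)) ∧
      List.count "0" u = zP b 0 m + zP a 1 m ∧ List.count "0" v = zP a 0 m + zP b 1 m := by
  induction m with
  | zero =>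
    refine ⟨[], [], ?_, by simp [zP], by simp [zP]⟩
    simp [PySem.List.pyRange]
  | succ m ih =>
    obtain ⟨u, v, heq, hu, hv⟩ := ih (by omega) (by omega)
    have hrange : PySem.List.pyRange 0 ((m + 1 : Nat) : Int) 1
        = PySem.List.pyRange 0 (m : Int) 1 ++ [(m : Int)] := by
      push_cast
      exact PySem.List.pyRange_one_succ_right (by omega)
    rw [hrange, List.foldl_append, heq]
    have hmod : PySem.Int.mod ((m : Nat) : Int) 2 = ((m % 2 : Nat) : Int) := by
      simp [PySem.Int.mod, Int.fmod_eq_emod]; try omega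
    simp only [List.foldl_cons, List.foldl_nil, hmod, PySem.List.pyGetD_natCast]
    have hz1 : ∀ xs p, zP xs p (m + 1) = zP xs p m + (if m % 2 = p ∧ xs.getD m "" = "0" then 1 else 0) :=
      fun xs p => rfl
    by_cases hpar : m % 2 = 0
    · rw [if_pos (by omega : ((m % 2 : Nat) : Int) = 0)]
      refine ⟨u ++ [b.getD m ""], v ++ [a.getD m ""], ?_, ?_, ?_⟩
      · simp only [Prod.mk.injEq]
        refine ⟨trivial, trivial, ?_, ?_⟩ <;> omega
      · rw [List.count_append, hu, hz1, hz1]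
        exact step_count _ _ _ _ _ (by constructor <;> intro h <;> [exact h.2; exact ⟨hpar, h⟩])
          (by intro h; omega)
      · rw [List.count_append, hv, hz1, hz1]
        exact step_count _ _ _ _ _ (by constructor <;> intro h <;> [exact h.2; exact ⟨hpar, h⟩])
          (by intro h; omega)
    · rw [if_neg (by omega : ¬ ((m % 2 : Nat) : Int) = 0)]
      refine ⟨u ++ [a.getD m ""], v ++ [b.getD m ""], ?_, ?_, ?_⟩
      · simp only [Prod.mk.injEq]
        refine ⟨trivial, trivial, ?_, ?_⟩ <;> omega
      · rw [List.count_append, hu, hz1, hz1]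
        exact step_count' _ _ _ _ _ (by intro h; omega)
          (by constructor <;> intro h <;> [exact h.2; exact ⟨by omega, h⟩])
      · rw [List.count_append, hv, hz1, hz1]
        exact step_count' _ _ _ _ _ (by intro h; omega)
          (by constructor <;> intro h <;> [exact h.2; exact ⟨by omega, h⟩])

theorem floordiv_natCast_two (m : Nat) : PySem.Int.floordiv ((m : Nat) : Int) 2 = ((m / 2 : Nat) : Int) := by
  simp [PySem.Int.floordiv, Int.fdiv_eq_ediv]

-- ===== VERDICT (by name: the statement is the Claim_ definition above) =====
theorem solve_spec : Claim_equal_solve := by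
  unfold Claim_equal_solve Spec_solve Pre_solve
  intro a b n _ hpre
  obtain ⟨hpa, hpb⟩ := hpre
  by_cases hn : 0 ≤ n
  · obtain ⟨m, rfl⟩ : ∃ m : Nat, n = (m : Int) := ⟨n.toNat, by omega⟩
    have ha : m ≤ a.length := by omega
    have hb : m ≤ b.length := by omega
    obtain ⟨u, v, heq, hu, hv⟩ := foldA a b m ha hb
    have cb0 := slice2_eq b 0 m (by omega) hb
    have ca1 := slice2_eq a 1 m (by omega) ha
    have ca0 := slice2_eq a 0 m (by omega) ha
    have cb1 := slice2_eq b 1 m (by omega) hb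
    rw [Nat.cast_zero] at cb0 ca0
    rw [Nat.cast_one] at ca1 cb1
    have hfd1 : PySem.Int.floordiv ((m : Nat) : Int) 2 = ((m / 2 : Nat) : Int) :=
      floordiv_natCast_two m
    have hfd2 : PySem.Int.floordiv (((m : Nat) : Int) + 1) 2 = (((m + 1) / 2 : Nat) : Int) := by
      simp [PySem.Int.floordiv, Int.fdiv_eq_ediv]
    simp only [solve, solve_alt, heq, cb0, ca1, ca0, cb1,
      count_range_zP b 0 (by omega) m, count_range_zP a 1 (by omega) m,
      count_range_zP a 0 (by omega) m, count_range_zP b 1 (by omega) m,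
      hu, hv, hfd1, hfd2]
  · have hra : PySem.List.pyRange 0 n 1 = [] := by
      simp [PySem.List.pyRange, show ¬(0:Int) < n by omega]
    have hf1 : PySem.Int.floordiv n 2 ≤ -1 := by
      simp [PySem.Int.floordiv, Int.fdiv_eq_ediv]
      omega
    have hf2 : PySem.Int.floordiv (n + 1) 2 ≤ 0 := by
      simp [PySem.Int.floordiv, Int.fdiv_eq_ediv]
      omega
    simp only [solve, solve_alt, hra, List.foldl_nil]
    rw [decide_eq_decide]
    constructor <;> intro _ <;> constructor <;> simp <;> omega
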